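-- pv_equiv track=rewrite | github.com/Adefioye/DSA_ZTM_QUESTIONS | 2DArrays/BFS-2Darray.py | find_bfs
-- ===== SOURCE A (Python) =====
-- from collections import deque
--
-- def find_bfs(matrix):
--     ROWS = len(matrix)
--     COLS = len(matrix[0])
--
--     visited = set()
--     result = []
--     queue = deque()
--     queue.append((0, 0))
--     visited.add((0, 0))
--     dirs = [(-1, 0), (0, 1), (1, 0), (0, -1)]
--
--     while queue:
--         curPosition = queue.popleft()
--         r, c = curPosition
--         result.append(matrix[r][c])
--
--         for dir in dirs:
--             row = r + dir[0]
--             col = c + dir[1]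
--
--             if row < 0 or row >= ROWS or col < 0 or col >= COLS or (row, col) in visited:
--                 continue
--
--             queue.append((row, col))
--             visited.add((row, col))
--
--     return result
-- ===== SOURCE B (Python) =====
-- def find_bfs(matrix):
--     ROWS = len(matrix)
--     COLS = len(matrix[0])
--     result = []
--     for d in range(ROWS + COLS - 1):
--         for r in range(max(0, d - COLS + 1), min(d, ROWS - 1) + 1):
--             result.append(matrix[r][d - r])
--     return result
-- ===== Notes on version B (the rewrite author's own statement) =====
-- stated objective: faster
-- what changed: Replaces the deque/visited-set BFS with a direct closed-form anti-diagonal scan: the BFS from (0,0) visits cells exactly in order of increasing r+c and, within a diagonal, increasing row, so B just emits matrix[r][d-r] for d = 0..ROWS+COLS-2.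
import Mathlib
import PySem

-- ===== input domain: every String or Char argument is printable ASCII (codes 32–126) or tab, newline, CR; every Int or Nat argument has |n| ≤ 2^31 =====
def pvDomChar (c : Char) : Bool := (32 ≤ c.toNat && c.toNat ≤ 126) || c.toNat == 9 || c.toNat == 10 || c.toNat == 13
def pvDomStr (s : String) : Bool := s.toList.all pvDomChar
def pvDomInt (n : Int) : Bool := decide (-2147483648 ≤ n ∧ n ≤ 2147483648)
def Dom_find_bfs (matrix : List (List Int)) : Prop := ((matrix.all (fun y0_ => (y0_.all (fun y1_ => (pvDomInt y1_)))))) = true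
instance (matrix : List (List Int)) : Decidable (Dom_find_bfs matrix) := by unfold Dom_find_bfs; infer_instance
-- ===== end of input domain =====

-- B replaces A's deque/visited-set BFS by a direct anti-diagonal scan (same values, measured constant-factor speedup).

-- matrix[r][c]; exact under Pre_ (both indices are then nonnegative and in range)
def pvCell (matrix : List (List Int)) (r c : Int) : Int :=
  PySem.List.pyGetD (PySem.List.pyGetD matrix r []) c 0

-- ===== PORT A =====
-- one iteration of A's 'for dir in dirs' body (row/col written inline)
def pvBfsStep (ROWS COLS : Int) (r c : Int)
    (st : List (Int × Int) × PySem.Set (Int × Int)) (dir : Int × Int) :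
    List (Int × Int) × PySem.Set (Int × Int) :=
  if r + dir.1 < 0 ∨ ROWS ≤ r + dir.1 ∨ c + dir.2 < 0 ∨ COLS ≤ c + dir.2 ∨ (r + dir.1, c + dir.2) ∈ st.2 then st
  else (st.1 ++ [(r + dir.1, c + dir.2)], PySem.Set.add st.2 (r + dir.1, c + dir.2))

-- A's 'while queue' loop; fuel only makes it total (each cell is enqueued at most once,
-- so ROWS*COLS fuel is never exhausted)
def pvBfsLoop (matrix : List (List Int)) (ROWS COLS : Int) :
    Nat → List (Int × Int) → PySem.Set (Int × Int) → List Int → List Int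
  | _, [], _, result => result
  | 0, _ :: _, _, result => result
  | fuel + 1, (r, c) :: rest, visited, result =>
    let st := [((-1 : Int), (0 : Int)), (0, 1), (1, 0), (0, -1)].foldl (pvBfsStep ROWS COLS r c) (rest, visited)
    pvBfsLoop matrix ROWS COLS fuel st.1 st.2 (result ++ [pvCell matrix r c])

def find_bfs (matrix : List (List Int)) : List Int :=
  pvBfsLoop matrix (matrix.length : Int) ((PySem.List.pyGetD matrix 0 []).length : Int)
    (matrix.length * (PySem.List.pyGetD matrix 0 []).length)
    [(0, 0)] (PySem.Set.add PySem.Set.empty (0, 0)) []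

-- ===== PORT B =====
def find_bfs_alt (matrix : List (List Int)) : List Int :=
  let ROWS : Int := matrix.length
  let COLS : Int := (PySem.List.pyGetD matrix 0 []).length
  (PySem.List.pyRange 0 (ROWS + COLS - 1) 1).flatMap (fun d =>
    (PySem.List.pyRange (max 0 (d - COLS + 1)) (min d (ROWS - 1) + 1) 1).map (fun r =>
      pvCell matrix r (d - r)))

-- ===== PRECONDITION & SPEC =====
-- Pre_ excludes exactly the inputs where A raises IndexError: the empty matrix (matrix[0]),
-- an empty first row (matrix[0][0]), and ragged matrices with some row shorter than len(matrix[0])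
-- (BFS reaches every cell (r,c) with c < COLS, so such a row is always hit).
def Pre_find_bfs (matrix : List (List Int)) : Prop :=
  matrix ≠ [] ∧ PySem.List.pyGetD matrix 0 [] ≠ [] ∧
  ∀ row ∈ matrix, (PySem.List.pyGetD matrix 0 []).length ≤ row.length
instance (matrix : List (List Int)) : Decidable (Pre_find_bfs matrix) := by unfold Pre_find_bfs; infer_instance
def pvWitness_find_bfs : List (List Int) := [[1, 2], [3, 4]]

def Spec_find_bfs (matrix : List (List Int)) (out : List Int) : Prop := out = find_bfs_alt matrix
instance (matrix : List (List Int)) (out : List Int) : Decidable (Spec_find_bfs matrix out) := by unfold Spec_find_bfs; infer_instance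

-- ===== CLAIM (what is proved, stated in full; the proofs are below) =====
def Claim_equal_find_bfs : Prop := ∀ (matrix : List (List Int)), Dom_find_bfs matrix → Pre_find_bfs matrix → Spec_find_bfs matrix (find_bfs matrix)

-- ===== LEMMAS AND PROOFS =====

-- the d-th anti-diagonal in row order, as B enumerates it
def pvDiag (R C d : Int) : List (Int × Int) :=
  (PySem.List.pyRange (max 0 (d - C + 1)) (min d (R - 1) + 1) 1).map (fun r => (r, d - r))

-- the cells x enqueues while A processes it (right child only from row 0, then down child)
def pvCh (R C : Int) (x : Int × Int) : List (Int × Int) :=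
  (if x.1 = 0 ∧ x.2 + 1 < C then [(x.1, x.2 + 1)] else []) ++
  (if x.1 + 1 < R then [(x.1 + 1, x.2)] else [])

-- all cells of diagonals 0..e (A's visited set once diagonal e is fully enqueued)
def pvVis (R C e : Int) : List (Int × Int) :=
  (PySem.List.pyRange 0 (e + 1) 1).flatMap (pvDiag R C)

lemma mem_pvDiag (R C d : Int) (z : Int × Int) :
    z ∈ pvDiag R C d ↔ z.1 + z.2 = d ∧ 0 ≤ z.1 ∧ z.1 < R ∧ 0 ≤ z.2 ∧ z.2 < C := by
  obtain ⟨a, b⟩ := z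
  simp only [pvDiag, List.mem_map, PySem.List.mem_pyRange_one, Prod.mk.injEq]
  constructor
  · rintro ⟨r, ⟨h1, h2⟩, rfl, rfl⟩; omega
  · rintro h; exact ⟨a, by omega, rfl, by omega⟩

lemma nodup_pvDiag (R C d : Int) : (pvDiag R C d).Nodup := by
  refine List.Nodup.map ?_ (PySem.List.nodup_pyRange_one _ _)
  intro a b h; simpa using congrArg Prod.fst h

lemma pvDiag_eq_nil (R C d : Int) (h : d < 0 ∨ R + C - 1 ≤ d) : pvDiag R C d = [] := by
  unfold pvDiag
  rw [PySem.List.pyRange_one_eq_nil (by omega)]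
  rfl

lemma mem_pvVis (R C e : Int) (z : Int × Int) :
    z ∈ pvVis R C e ↔ z.1 + z.2 ≤ e ∧ 0 ≤ z.1 ∧ z.1 < R ∧ 0 ≤ z.2 ∧ z.2 < C := by
  simp only [pvVis, List.mem_flatMap, PySem.List.mem_pyRange_one, mem_pvDiag]
  constructor
  · rintro ⟨d, ⟨h1, h2⟩, h3⟩; omega
  · rintro h; exact ⟨z.1 + z.2, by omega, by omega⟩

lemma pvVis_succ (R C d : Int) (hd : 0 ≤ d) :
    pvVis R C d ++ pvDiag R C (d + 1) = pvVis R C (d + 1) := by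
  have h : PySem.List.pyRange 0 (d + 1 + 1) 1 = PySem.List.pyRange 0 (d + 1) 1 ++ [d + 1] :=
    PySem.List.pyRange_one_succ_right (by omega)
  rw [pvVis, pvVis, h, List.flatMap_append]
  simp

-- children of diagonal d, concatenated in processing order, are exactly diagonal d+1
lemma pvChAux (R C d : Int) :
    ∀ (n : Nat) (a : Int), 0 ≤ a → min d (R - 1) + 1 - a ≤ n →
      ((PySem.List.pyRange a (min d (R - 1) + 1) 1).map (fun r => (r, d - r))).flatMap (pvCh R C)
      = (if a ≤ min d (R - 1) ∧ a = 0 ∧ d + 1 < C then [((0 : Int), d + 1)] else [])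
        ++ (PySem.List.pyRange (a + 1) (min (d + 1) (R - 1) + 1) 1).map (fun r => (r, d + 1 - r)) := by
  intro n
  induction n with
  | zero =>
    intro a ha hbound
    rw [PySem.List.pyRange_one_eq_nil (by omega), PySem.List.pyRange_one_eq_nil (by omega),
      if_neg (by omega)]
    rfl
  | succ n ih =>
    intro a ha hbound
    by_cases hlt : min d (R - 1) + 1 ≤ a
    · rw [PySem.List.pyRange_one_eq_nil hlt, PySem.List.pyRange_one_eq_nil (by omega),
        if_neg (by omega)]
      rfl
    · 
      rw [PySem.List.pyRange_one_cons (by omega)]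
      simp only [List.map_cons, List.flatMap_cons]
      rw [ih (a + 1) (by omega) (by omega), if_neg (by omega)]
      simp only [List.nil_append, pvCh]
      by_cases hR1 : a + 1 < R
      · have hcons : PySem.List.pyRange (a + 1) (min (d + 1) (R - 1) + 1) 1
            = (a + 1) :: PySem.List.pyRange (a + 1 + 1) (min (d + 1) (R - 1) + 1) 1 :=
          PySem.List.pyRange_one_cons (by omega)
        rw [hcons]
        simp only [List.map_cons, if_pos hR1]
        have he : d + 1 - (a + 1) = d - a := by ring
        rw [he]
        by_cases h0 : a = 0 ∧ d - a + 1 < C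
        · rw [if_pos h0, if_pos ⟨by omega, by omega, by omega⟩]
          have : ((0 : Int), d + 1) = (a, d - a + 1) := by
            obtain ⟨h0a, _⟩ := h0; subst h0a; norm_num
          rw [this]
          simp
        · rw [if_neg h0, if_neg (by omega)]
          simp
      · have h2 : PySem.List.pyRange (a + 1) (min (d + 1) (R - 1) + 1) 1 = [] :=
          PySem.List.pyRange_one_eq_nil (by omega)
        have h3 : PySem.List.pyRange (a + 1 + 1) (min (d + 1) (R - 1) + 1) 1 = [] :=
          PySem.List.pyRange_one_eq_nil (by omega)
        rw [h2, h3, if_neg hR1]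
        by_cases h0 : a = 0 ∧ d - a + 1 < C
        · rw [if_pos h0, if_pos ⟨by omega, by omega, by omega⟩]
          have : ((0 : Int), d + 1) = (a, d - a + 1) := by
            obtain ⟨h0a, _⟩ := h0; subst h0a; norm_num
          rw [this]
          simp
        · rw [if_neg h0, if_neg (by omega)]
          simp

lemma pvChildConcat (R C d : Int) (hR : 1 ≤ R) (_hC : 1 ≤ C) (hd : 0 ≤ d) :
    (pvDiag R C d).flatMap (pvCh R C) = pvDiag R C (d + 1) := by
  have hmain := pvChAux R C d ((min d (R - 1) + 1 - max 0 (d - C + 1)).toNat)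
    (max 0 (d - C + 1)) (by omega) (by omega)
  rw [pvDiag, pvDiag, hmain]
  by_cases hc : d + 1 < C
  · have h1 : max 0 (d - C + 1) = 0 := by omega
    have h2 : max 0 (d + 1 - C + 1) = 0 := by omega
    rw [h1, h2, if_pos ⟨by omega, rfl, hc⟩,
      PySem.List.pyRange_one_cons (show (0 : Int) < min (d + 1) (R - 1) + 1 by omega)]
    simp only [List.map_cons]
    norm_num
  · have h1 : max 0 (d + 1 - C + 1) = max 0 (d - C + 1) + 1 := by omega
    rw [if_neg (by omega), h1]
    simp

-- the already-processed prefix of diagonal d contains every diagonal-d cell of smaller row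
lemma pvDone_mem (R C d : Int) (done todo' : List (Int × Int)) (r c : Int)
    (hsplit : pvDiag R C d = done ++ (r, c) :: todo') :
    ∀ r', max 0 (d - C + 1) ≤ r' → r' < r → (r', d - r') ∈ done := by
  intro r' h1 h2
  have hlen : (pvDiag R C d).length = (min d (R - 1) + 1 - max 0 (d - C + 1)).toNat := by
    simp [pvDiag, PySem.List.length_pyRange_one]
  have hklt : done.length < (pvDiag R C d).length := by
    rw [hsplit]; simp
  have hget1 : (pvDiag R C d)[done.length]'hklt = (r, c) := by
    rw [List.getElem_of_eq hsplit, List.getElem_append_right (Nat.le_refl _)]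
    simp
  have hget2 : (pvDiag R C d)[done.length]'hklt
      = (max 0 (d - C + 1) + done.length, d - (max 0 (d - C + 1) + done.length)) := by
    simp [pvDiag, PySem.List.getElem_pyRange_one]
  have hr : r = max 0 (d - C + 1) + done.length := by
    have h := hget1.symm.trans hget2
    simpa using congrArg Prod.fst h
  have hlelen : done.length < (min d (R - 1) + 1 - max 0 (d - C + 1)).toNat := by
    rw [← hlen]; exact hklt
  have hsr : PySem.List.pyRange (max 0 (d - C + 1)) (min d (R - 1) + 1) 1
      = PySem.List.pyRange (max 0 (d - C + 1)) r 1 ++ PySem.List.pyRange r (min d (R - 1) + 1) 1 :=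
    PySem.List.pyRange_one_append _ _ _ (by omega) (by omega)
  have hdd : pvDiag R C d
      = (PySem.List.pyRange (max 0 (d - C + 1)) r 1).map (fun x => (x, d - x))
        ++ (PySem.List.pyRange r (min d (R - 1) + 1) 1).map (fun x => (x, d - x)) := by
    rw [pvDiag, hsr, List.map_append]
  have hdone : done = (PySem.List.pyRange (max 0 (d - C + 1)) r 1).map (fun x => (x, d - x)) := by
    refine List.append_inj_left (hsplit.symm.trans hdd) ?_
    simp [PySem.List.length_pyRange_one]
    omega
  rw [hdone]
  exact List.mem_map.mpr ⟨r', PySem.List.mem_pyRange_one.mpr ⟨h1, h2⟩, rfl⟩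

lemma pvStepSkip (R C r c : Int) (st : List (Int × Int) × PySem.Set (Int × Int)) (dir : Int × Int)
    (h : r + dir.1 < 0 ∨ R ≤ r + dir.1 ∨ c + dir.2 < 0 ∨ C ≤ c + dir.2 ∨ (r + dir.1, c + dir.2) ∈ st.2) :
    pvBfsStep R C r c st dir = st := by
  rw [pvBfsStep, if_pos h]

lemma pvStepAdd (R C r c : Int) (st : List (Int × Int) × PySem.Set (Int × Int)) (dir : Int × Int)
    (h1 : 0 ≤ r + dir.1) (h2 : r + dir.1 < R) (h3 : 0 ≤ c + dir.2) (h4 : c + dir.2 < C)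
    (h5 : (r + dir.1, c + dir.2) ∉ st.2) :
    pvBfsStep R C r c st dir = (st.1 ++ [(r + dir.1, c + dir.2)], st.2 ++ [(r + dir.1, c + dir.2)]) := by
  rw [pvBfsStep, if_neg ?_, PySem.Set.add_of_not_mem h5]
  rintro (h | h | h | h | h) <;> first | omega | exact h5 h

-- processing cell (r,c) of diagonal d enqueues exactly its children
lemma pvStepFold (R C d : Int) (hR : 1 ≤ R) (hC : 1 ≤ C) (hd : 0 ≤ d)
    (done todo' : List (Int × Int)) (r c : Int)
    (hsplit : pvDiag R C d = done ++ (r, c) :: todo') (q : List (Int × Int)) :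
    [((-1 : Int), (0 : Int)), (0, 1), (1, 0), (0, -1)].foldl (pvBfsStep R C r c)
      (q, pvVis R C d ++ done.flatMap (pvCh R C))
    = (q ++ pvCh R C (r, c), (pvVis R C d ++ done.flatMap (pvCh R C)) ++ pvCh R C (r, c)) := by
  have hx : (r, c) ∈ pvDiag R C d := by rw [hsplit]; simp
  obtain ⟨hsum, hr0, hrR, hc0, hcC⟩ := (mem_pvDiag R C d (r, c)).mp hx
  set V := pvVis R C d ++ done.flatMap (pvCh R C) with hVdef
  have hVmem : ∀ a b : Int, 0 ≤ a → a < R → 0 ≤ b → b < C → a + b ≤ d → (a, b) ∈ V :=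
    fun a b h1 h2 h3 h4 h5 =>
      List.mem_append.mpr (Or.inl ((mem_pvVis R C d (a, b)).mpr ⟨h5, h1, h2, h3, h4⟩))
  have hright_old : 1 ≤ r → c + 1 < C → (r, c + 1) ∈ V := by
    intro hr1 hc1
    refine List.mem_append.mpr (Or.inr (List.mem_flatMap.mpr ⟨(r - 1, c + 1), ?_, ?_⟩))
    · have hm := pvDone_mem R C d done todo' r c hsplit (r - 1) (by omega) (by omega)
      have he : d - (r - 1) = c + 1 := by omega
      rw [he] at hm
      exact hm
    · refine List.mem_append.mpr (Or.inr ?_)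
      rw [if_pos (show (r - 1, c + 1).1 + 1 < R by simp; omega)]
      simp
  have hchsum : ∀ z ∈ pvCh R C (r, c), z.1 + z.2 = d + 1 := by
    intro z hz
    rcases List.mem_append.mp hz with h | h
    · by_cases hcond : (r, c).1 = 0 ∧ (r, c).2 + 1 < C
      · rw [if_pos hcond] at h
        simp only [List.mem_singleton] at h
        subst h
        simp at hcond ⊢
        omega
      · rw [if_neg hcond] at h
        simp at h
    · by_cases hcond : (r, c).1 + 1 < R
      · rw [if_pos hcond] at h
        simp only [List.mem_singleton] at h
        subst h
        simp
        omega
      · rw [if_neg hcond] at h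
        simp at h
  have hconcat : done.flatMap (pvCh R C) ++ (pvCh R C (r, c) ++ todo'.flatMap (pvCh R C))
      = pvDiag R C (d + 1) := by
    rw [← pvChildConcat R C d hR hC hd, hsplit]
    simp [List.flatMap_append]
  have hfresh : ∀ z ∈ pvCh R C (r, c), z ∉ V := by
    intro z hz hmem
    rcases List.mem_append.mp hmem with hv | hE
    · have h1 := (mem_pvVis R C d z).mp hv
      have h2 := hchsum z hz
      omega
    · have hnd : (done.flatMap (pvCh R C) ++ (pvCh R C (r, c) ++ todo'.flatMap (pvCh R C))).Nodup :=
        hconcat ▸ nodup_pvDiag R C (d + 1)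
      exact (List.disjoint_of_nodup_append hnd) hE (List.mem_append_left _ hz)
  -- evaluate the four direction steps
  have hup : pvBfsStep R C r c (q, V) (-1, 0) = (q, V) := by
    apply pvStepSkip
    show r + (-1) < 0 ∨ R ≤ r + (-1) ∨ c + 0 < 0 ∨ C ≤ c + 0 ∨ (r + (-1), c + 0) ∈ V
    by_cases h : r = 0
    · exact Or.inl (by omega)
    · refine Or.inr (Or.inr (Or.inr (Or.inr ?_)))
      have hm : (r - 1, c) ∈ V := hVmem (r - 1) c (by omega) (by omega) hc0 hcC (by omega)
      rw [show r + (-1) = r - 1 by ring, show c + (0 : Int) = c by ring]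
      exact hm
  rw [List.foldl_cons, List.foldl_cons, List.foldl_cons, List.foldl_cons, List.foldl_nil, hup]
  by_cases hRt : r = 0 ∧ c + 1 < C
  · have hrt : pvBfsStep R C r c (q, V) (0, 1) = (q ++ [(r, c + 1)], V ++ [(r, c + 1)]) := by
      have hnotmem : (r + 0, c + 1) ∉ V := by
        rw [show r + (0 : Int) = r by ring]
        refine hfresh (r, c + 1) ?_
        exact List.mem_append.mpr (Or.inl (by rw [if_pos (show (r,c).1 = 0 ∧ (r,c).2 + 1 < C from hRt)]; simp))
      have := pvStepAdd R C r c (q, V) (0, 1) (by simp; omega) (by simp; omega)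
        (by simp; omega) (by simp; omega) hnotmem
      rw [this, show r + (0 : Int) = r by ring]
    rw [hrt]
    by_cases hDn : r + 1 < R
    · have hdn : pvBfsStep R C r c (q ++ [(r, c + 1)], V ++ [(r, c + 1)]) (1, 0)
          = (q ++ [(r, c + 1)] ++ [(r + 1, c)], V ++ [(r, c + 1)] ++ [(r + 1, c)]) := by
        have hmemch : (r + 1, c) ∈ pvCh R C (r, c) := by
          refine List.mem_append.mpr (Or.inr ?_)
          rw [if_pos (show (r, c).1 + 1 < R from hDn)]
          simp
        have hnotmem : (r + 1, c + 0) ∉ V ++ [(r, c + 1)] := by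
          rw [show c + (0 : Int) = c by ring]
          intro hmem
          rcases List.mem_append.mp hmem with h | h
          · exact hfresh _ hmemch h
          · simp at h
        have := pvStepAdd R C r c (q ++ [(r, c + 1)], V ++ [(r, c + 1)]) (1, 0)
          (by simp; omega) (by simp; omega) (by simp; omega) (by simp; omega) hnotmem
        rw [this, show c + (0 : Int) = c by ring]
      rw [hdn]
      have hlf : pvBfsStep R C r c (q ++ [(r, c + 1)] ++ [(r + 1, c)], V ++ [(r, c + 1)] ++ [(r + 1, c)]) (0, -1)
          = (q ++ [(r, c + 1)] ++ [(r + 1, c)], V ++ [(r, c + 1)] ++ [(r + 1, c)]) := by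
        apply pvStepSkip
        by_cases h : c = 0
        · exact Or.inr (Or.inr (Or.inl (by simp; omega)))
        · refine Or.inr (Or.inr (Or.inr (Or.inr ?_)))
          have hm : (r, c - 1) ∈ V := hVmem r (c - 1) hr0 hrR (by omega) (by omega) (by omega)
          show (r + 0, c + -1) ∈ _
          rw [show r + (0 : Int) = r by ring, show c + (-1 : Int) = c - 1 by ring]
          exact List.mem_append.mpr (Or.inl (List.mem_append.mpr (Or.inl hm)))
      rw [hlf]
      have hch : pvCh R C (r, c) = [(r, c + 1)] ++ [(r + 1, c)] := by
        rw [pvCh, if_pos (show (r, c).1 = 0 ∧ (r, c).2 + 1 < C from hRt),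
          if_pos (show (r, c).1 + 1 < R from hDn)]
      rw [hch]
      simp [List.append_assoc]
    · have hdn : pvBfsStep R C r c (q ++ [(r, c + 1)], V ++ [(r, c + 1)]) (1, 0)
          = (q ++ [(r, c + 1)], V ++ [(r, c + 1)]) := by
        apply pvStepSkip
        exact Or.inr (Or.inl (by simp; omega))
      rw [hdn]
      have hlf : pvBfsStep R C r c (q ++ [(r, c + 1)], V ++ [(r, c + 1)]) (0, -1)
          = (q ++ [(r, c + 1)], V ++ [(r, c + 1)]) := by
        apply pvStepSkip
        by_cases h : c = 0
        · exact Or.inr (Or.inr (Or.inl (by simp; omega)))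
        · refine Or.inr (Or.inr (Or.inr (Or.inr ?_)))
          have hm : (r, c - 1) ∈ V := hVmem r (c - 1) hr0 hrR (by omega) (by omega) (by omega)
          show (r + 0, c + -1) ∈ _
          rw [show r + (0 : Int) = r by ring, show c + (-1 : Int) = c - 1 by ring]
          exact List.mem_append.mpr (Or.inl hm)
      rw [hlf]
      have hch : pvCh R C (r, c) = [(r, c + 1)] := by
        rw [pvCh, if_pos (show (r, c).1 = 0 ∧ (r, c).2 + 1 < C from hRt),
          if_neg (show ¬ ((r, c).1 + 1 < R) from hDn)]
        simp
      rw [hch]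
  · have hrt : pvBfsStep R C r c (q, V) (0, 1) = (q, V) := by
      apply pvStepSkip
      by_cases h : c + 1 < C
      · refine Or.inr (Or.inr (Or.inr (Or.inr ?_)))
        have hr1 : 1 ≤ r := by
          rcases not_and_or.mp hRt with h' | h'
          · omega
          · exact absurd h h'
        have hm : (r, c + 1) ∈ V := hright_old hr1 h
        show (r + 0, c + 1) ∈ _
        rw [show r + (0 : Int) = r by ring]
        exact hm
      · exact Or.inr (Or.inr (Or.inr (Or.inl (by simp; omega))))
    rw [hrt]
    by_cases hDn : r + 1 < R
    · have hdn : pvBfsStep R C r c (q, V) (1, 0) = (q ++ [(r + 1, c)], V ++ [(r + 1, c)]) := by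
        have hmemch : (r + 1, c) ∈ pvCh R C (r, c) := by
          refine List.mem_append.mpr (Or.inr ?_)
          rw [if_pos (show (r, c).1 + 1 < R from hDn)]
          simp
        have hnotmem : (r + 1, c + 0) ∉ V := by
          rw [show c + (0 : Int) = c by ring]
          exact hfresh _ hmemch
        have := pvStepAdd R C r c (q, V) (1, 0)
          (by simp; omega) (by simp; omega) (by simp; omega) (by simp; omega) hnotmem
        rw [this, show c + (0 : Int) = c by ring]
      rw [hdn]
      have hlf : pvBfsStep R C r c (q ++ [(r + 1, c)], V ++ [(r + 1, c)]) (0, -1)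
          = (q ++ [(r + 1, c)], V ++ [(r + 1, c)]) := by
        apply pvStepSkip
        by_cases h : c = 0
        · exact Or.inr (Or.inr (Or.inl (by simp; omega)))
        · refine Or.inr (Or.inr (Or.inr (Or.inr ?_)))
          have hm : (r, c - 1) ∈ V := hVmem r (c - 1) hr0 hrR (by omega) (by omega) (by omega)
          show (r + 0, c + -1) ∈ _
          rw [show r + (0 : Int) = r by ring, show c + (-1 : Int) = c - 1 by ring]
          exact List.mem_append.mpr (Or.inl hm)
      rw [hlf]
      have hch : pvCh R C (r, c) = [(r + 1, c)] := by
        rw [pvCh, if_neg (show ¬ ((r, c).1 = 0 ∧ (r, c).2 + 1 < C) from hRt),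
          if_pos (show (r, c).1 + 1 < R from hDn)]
        simp
      rw [hch]
    · have hdn : pvBfsStep R C r c (q, V) (1, 0) = (q, V) := by
        apply pvStepSkip
        exact Or.inr (Or.inl (by simp; omega))
      rw [hdn]
      have hlf : pvBfsStep R C r c (q, V) (0, -1) = (q, V) := by
        apply pvStepSkip
        by_cases h : c = 0
        · exact Or.inr (Or.inr (Or.inl (by simp; omega)))
        · refine Or.inr (Or.inr (Or.inr (Or.inr ?_)))
          have hm : (r, c - 1) ∈ V := hVmem r (c - 1) hr0 hrR (by omega) (by omega) (by omega)
          show (r + 0, c + -1) ∈ _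
          rw [show r + (0 : Int) = r by ring, show c + (-1 : Int) = c - 1 by ring]
          exact hm
      rw [hlf]
      have hch : pvCh R C (r, c) = [] := by
        rw [pvCh, if_neg (show ¬ ((r, c).1 = 0 ∧ (r, c).2 + 1 < C) from hRt),
          if_neg (show ¬ ((r, c).1 + 1 < R) from hDn)]
        simp
      rw [hch]
      simp

-- processing the rest of diagonal d emits its values and leaves diagonal d+1 as the queue
lemma pvBfsDiag (matrix : List (List Int)) (R C d : Int) (hR : 1 ≤ R) (hC : 1 ≤ C) (hd : 0 ≤ d) :
    ∀ (todo done : List (Int × Int)) (fuel : Nat) (result : List Int),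
      pvDiag R C d = done ++ todo → todo.length ≤ fuel →
      pvBfsLoop matrix R C fuel (todo ++ done.flatMap (pvCh R C))
        (pvVis R C d ++ done.flatMap (pvCh R C)) result
      = pvBfsLoop matrix R C (fuel - todo.length) (pvDiag R C (d + 1)) (pvVis R C (d + 1))
          (result ++ todo.map (fun x => pvCell matrix x.1 x.2)) := by
  intro todo
  induction todo with
  | nil =>
    intro done fuel result hsplit hfuel
    have hdone : done = pvDiag R C d := by simpa using hsplit.symm
    subst hdone
    simp only [List.nil_append, List.map_nil, List.append_nil, List.length_nil, Nat.sub_zero]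
    rw [pvChildConcat R C d hR hC hd, pvVis_succ R C d hd]
  | cons x todo' ih =>
    obtain ⟨r, c⟩ := x
    intro done fuel result hsplit hfuel
    cases fuel with
    | zero => simp at hfuel
    | succ f =>
      have hsplit' : pvDiag R C d = (done ++ [(r, c)]) ++ todo' := by rw [hsplit]; simp
      have hE : (done ++ [(r, c)]).flatMap (pvCh R C)
          = done.flatMap (pvCh R C) ++ pvCh R C (r, c) := by
        simp [List.flatMap_append]
      have hstep : pvBfsLoop matrix R C (f + 1) (((r, c) :: todo') ++ done.flatMap (pvCh R C))
          (pvVis R C d ++ done.flatMap (pvCh R C)) result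
          = pvBfsLoop matrix R C f (todo' ++ (done ++ [(r, c)]).flatMap (pvCh R C))
            (pvVis R C d ++ (done ++ [(r, c)]).flatMap (pvCh R C)) (result ++ [pvCell matrix r c]) := by
        rw [List.cons_append, pvBfsLoop,
          pvStepFold R C d hR hC hd done todo' r c hsplit (todo' ++ done.flatMap (pvCh R C)), hE]
        simp [List.append_assoc]
      have hfl : f + 1 - ((r, c) :: todo').length = f - todo'.length := by
        simp [Nat.succ_sub_succ]
      have hmp : result ++ ((r, c) :: todo').map (fun x => pvCell matrix x.1 x.2)
          = (result ++ [pvCell matrix r c]) ++ todo'.map (fun x => pvCell matrix x.1 x.2) := by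
        simp
      rw [hfl, hmp]
      exact hstep.trans (ih (done ++ [(r, c)]) f (result ++ [pvCell matrix r c]) hsplit'
        (by simp at hfuel; omega))

-- running the loop from the start of diagonal d emits all remaining diagonals
lemma pvBfsOuter (matrix : List (List Int)) (R C : Int) (hR : 1 ≤ R) (hC : 1 ≤ C) :
    ∀ (n : Nat) (d : Int), 0 ≤ d → R + C - 1 - d ≤ n →
    ∀ (fuel : Nat) (result : List Int),
      ((PySem.List.pyRange d (R + C - 1) 1).flatMap (pvDiag R C)).length ≤ fuel →
      pvBfsLoop matrix R C fuel (pvDiag R C d) (pvVis R C d) result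
      = result ++ ((PySem.List.pyRange d (R + C - 1) 1).flatMap (pvDiag R C)).map
          (fun x => pvCell matrix x.1 x.2) := by
  intro n
  induction n with
  | zero =>
    intro d hd hn fuel result hfuel
    rw [PySem.List.pyRange_one_eq_nil (by omega), pvDiag_eq_nil R C d (by omega)]
    cases fuel <;> simp [pvBfsLoop]
  | succ n ih =>
    intro d hd hn fuel result hfuel
    by_cases hend : R + C - 1 ≤ d
    · rw [PySem.List.pyRange_one_eq_nil (by omega), pvDiag_eq_nil R C d (by omega)]
      cases fuel <;> simp [pvBfsLoop]
    · have hcons : PySem.List.pyRange d (R + C - 1) 1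
          = d :: PySem.List.pyRange (d + 1) (R + C - 1) 1 := PySem.List.pyRange_one_cons (by omega)
      rw [hcons] at hfuel ⊢
      simp only [List.flatMap_cons, List.length_append, List.map_append] at hfuel ⊢
      have hinner := pvBfsDiag matrix R C d hR hC hd (pvDiag R C d) [] fuel result
        (by simp) (by omega)
      simp only [List.flatMap_nil, List.append_nil] at hinner
      rw [hinner, ih (d + 1) (by omega) (by omega) (fuel - (pvDiag R C d).length)
        (result ++ (pvDiag R C d).map (fun x => pvCell matrix x.1 x.2)) (by omega)]
      simp [List.append_assoc]

lemma pvFuelBound (R C : Int) (_hR : 0 ≤ R) (_hC : 0 ≤ C) :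
    ((PySem.List.pyRange 0 (R + C - 1) 1).flatMap (pvDiag R C)).length ≤ R.toNat * C.toNat := by
  have hN : ((PySem.List.pyRange 0 (R + C - 1) 1).flatMap (pvDiag R C)).Nodup := by
    rw [List.flatMap_def, List.nodup_flatten]
    refine ⟨?_, ?_⟩
    · rintro l hl
      obtain ⟨d, _, rfl⟩ := List.mem_map.mp hl
      exact nodup_pvDiag R C d
    · refine List.pairwise_map.mpr (List.Pairwise.imp ?_ (PySem.List.pairwise_lt_pyRange_one _ _))
      intro a b hab z hz1 hz2
      have h1 := (mem_pvDiag R C a z).mp hz1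
      have h2 := (mem_pvDiag R C b z).mp hz2
      omega
  have hsub : (PySem.List.pyRange 0 (R + C - 1) 1).flatMap (pvDiag R C)
      ⊆ (PySem.List.pyRange 0 R 1).flatMap (fun a => (PySem.List.pyRange 0 C 1).map (fun b => (a, b))) := by
    intro z hz
    simp only [List.mem_flatMap, PySem.List.mem_pyRange_one, mem_pvDiag, List.mem_map] at hz ⊢
    obtain ⟨dd, hdd, hsum, h1, h2, h3, h4⟩ := hz
    exact ⟨z.1, ⟨h1, h2⟩, z.2, ⟨h3, h4⟩, rfl⟩
  have hS : ((PySem.List.pyRange 0 R 1).flatMap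
      (fun a => (PySem.List.pyRange 0 C 1).map (fun b => (a, b)))).length = R.toNat * C.toNat := by
    rw [List.length_flatMap]
    simp only [List.length_map, PySem.List.length_pyRange_one, List.map_const', List.sum_replicate,
      smul_eq_mul, Int.sub_zero]
  calc ((PySem.List.pyRange 0 (R + C - 1) 1).flatMap (pvDiag R C)).length
      ≤ ((PySem.List.pyRange 0 R 1).flatMap
          (fun a => (PySem.List.pyRange 0 C 1).map (fun b => (a, b)))).length :=
        (hN.subperm hsub).length_le
    _ = R.toNat * C.toNat := hS

lemma pvDiag_zero (R C : Int) (hR : 1 ≤ R) (hC : 1 ≤ C) : pvDiag R C 0 = [((0 : Int), (0 : Int))] := by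
  have h1 : max 0 (0 - C + 1) = 0 := by omega
  have h2 : min (0 : Int) (R - 1) = 0 := by omega
  rw [pvDiag, h1, h2, PySem.List.pyRange_one_singleton]
  norm_num

-- ===== VERDICT (by name: the statement is the Claim_ definition above) =====
lemma pvAltEq (matrix : List (List Int)) (R C : Int) (hR : R = (matrix.length : Int))
    (hC : C = ((PySem.List.pyGetD matrix 0 []).length : Int)) :
    find_bfs_alt matrix
    = ((PySem.List.pyRange 0 (R + C - 1) 1).flatMap (pvDiag R C)).map
        (fun x => pvCell matrix x.1 x.2) := by
  subst hR hC
  simp only [find_bfs_alt]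
  rw [List.map_flatMap]
  congr 1
  funext d
  rw [pvDiag, List.map_map]
  rfl

theorem find_bfs_spec : Claim_equal_find_bfs := by
  intro matrix _ hpre
  obtain ⟨h1, h2, h3⟩ := hpre
  unfold Spec_find_bfs
  have hR : 1 ≤ (matrix.length : Int) := by
    have := List.length_pos_iff.mpr h1
    omega
  have hC : 1 ≤ ((PySem.List.pyGetD matrix 0 []).length : Int) := by
    have := List.length_pos_iff.mpr h2
    omega
  have hvis0 : PySem.Set.add PySem.Set.empty ((0 : Int), (0 : Int)) = [((0 : Int), (0 : Int))] := rfl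
  have hv0 : pvVis (matrix.length : Int) ((PySem.List.pyGetD matrix 0 []).length : Int) 0
      = [((0 : Int), (0 : Int))] := by
    rw [pvVis, show (0 : Int) + 1 = 0 + 1 by rfl, PySem.List.pyRange_one_singleton]
    simp [pvDiag_zero _ _ hR hC]
  have hfuel : (((PySem.List.pyRange 0 ((matrix.length : Int) + ((PySem.List.pyGetD matrix 0 []).length : Int) - 1) 1).flatMap
      (pvDiag (matrix.length : Int) ((PySem.List.pyGetD matrix 0 []).length : Int))).length)
      ≤ matrix.length * (PySem.List.pyGetD matrix 0 []).length := by
    have := pvFuelBound (matrix.length : Int) ((PySem.List.pyGetD matrix 0 []).length : Int)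
      (by omega) (by omega)
    simpa using this
  have houter := pvBfsOuter matrix (matrix.length : Int) ((PySem.List.pyGetD matrix 0 []).length : Int)
    hR hC (((matrix.length : Int) + ((PySem.List.pyGetD matrix 0 []).length : Int) - 1).toNat)
    0 (le_refl 0) (by omega) (matrix.length * (PySem.List.pyGetD matrix 0 []).length) [] hfuel
  rw [pvDiag_zero _ _ hR hC, hv0] at houter
  rw [find_bfs, hvis0, houter, pvAltEq matrix _ _ rfl rfl]
  simp
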